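-- pv_equiv track=rewrite | github.com/9468305/python-script | geetest_online/test/testgeetestjs.py | fun_f
-- ===== SOURCE A (Python) =====
-- def fun_c(param):
--     '''reversed from geetest.js'''
--     _b = 0
--     _c = 0
--     _d = 0
--     _e = []
--     _f = 0
--     _g = []
--     _h = 0
--     for _h in range(0, len(param)-1):
--         _b = round(param[_h + 1][0] - param[_h][0])
--         _c = round(param[_h + 1][1] - param[_h][1])
--         _d = round(param[_h + 1][2] - param[_h][2])
--         _g.append([_b, _c, _d])
--         if _b == 0 and _c == 0 and _d == 0:
--             continue
--         else:
--             if _b == 0 and _c == 0: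
--                 _f = _f + _d
--             else:
--                 _e.append([_b, _c, _d + _f])
--                 _f = 0
--     if _f != 0:
--         _e.append([_b, _c, _f])
--     return _e
--
-- def fun_d(param):
--     '''reversed from geetest.js'''
--     _b = "()*,-./0123456789:?@ABCDEFGHIJKLMNOPQRSTUVWXYZ_abcdefghijklmnopqr"
--     _c = len(_b)
--     _d = ""
--     _e = abs(param)
--     _f = int(_e / _c)
--     if _f >= _c:
--         _f = _c - 1
--     if _f:
--         _d = chr(_f)
--     _e = _e % _c
--     _g = ''
--     if param < 0:
--         _g = _g + '!'
--     if _d: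
--         _g = _g + '$'
--     return _g + _d + _b[int(_e)]
--
-- def fun_e(param):
--     '''reversed from geetest.js'''
--     _b = [[1, 0], [2, 0], [1, -1], [1, 1], [0, 1], [0, -1], [3, 0], [2, -1], [2, 1]]
--     _c = "stuvwxyz~"
--     _d = 0
--     _e = len(_b)
--     for _d in range(0, len(_b)):
--         if param[0] == _b[_d][0] and param[1] == _b[_d][1]:
--             return _c[_d]
--     return 0
--
-- def fun_f(param):
--     '''reversed from geetest.js'''
--     _b = None
--     _f = fun_c(param)
--     _g = []
--     _h = []
--     _i = []
--     for j in _f: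
--         _b = fun_e(j)
--         if _b:
--             _h.append(_b)
--         else:
--             _g.append(fun_d(j[0]))
--             _h.append(fun_d(j[1]))
--         _i.append(fun_d(j[2]))
--
--     return ''.join(j for j in _g) + '!!' + ''.join(j for j in _h) + '!!' + ''.join(j for j in _i)
-- ===== SOURCE B (Python) =====
-- _ALPH = "()*,-./0123456789:?@ABCDEFGHIJKLMNOPQRSTUVWXYZ_abcdefghijklmnopqr"
-- _SHORT = {(1, 0): 's', (2, 0): 't', (1, -1): 'u', (1, 1): 'v', (0, 1): 'w',
--           (0, -1): 'x', (3, 0): 'y', (2, -1): 'z', (2, 1): '~'}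
--
-- def _enc(n):
--     q, r = divmod(abs(n), 65)
--     if q >= 65:
--         q = 64
--     return ('!' if n < 0 else '') + ('$' + chr(q) if q else '') + _ALPH[r]
--
-- def fun_f(param):
--     # Stage 1: coordinate deltas of adjacent points.
--     deltas = [(b[0] - a[0], b[1] - a[1], b[2] - a[2])
--               for a, b in zip(param, param[1:])]
--     n = len(deltas)
--     # Stage 2: prefix sums of the z-deltas, so each emitted z is a difference
--     # of two prefix sums instead of a running carry.
--     s = [0]
--     t = 0
--     for _, _, d in deltas:
--         t += d
--         s.append(t)
--     # Stage 3: the emitted triples sit exactly at the indices whose (x,y) delta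
--     # is nonzero; the z of each absorbs the whole zero-(x,y) run before it.
--     marks = [k for k, (b, c, _) in enumerate(deltas) if b or c]
--     starts = [0] + [k + 1 for k in marks]
--     triples = [(deltas[k][0], deltas[k][1], s[k + 1] - s[p])
--                for p, k in zip(starts, marks)]
--     tail = s[n] - s[starts[-1]]
--     if tail:
--         triples.append((0, 0, tail))
--     # Stage 4: encode.
--     g, h, i = [], [], []
--     for x, y, z in triples:
--         ch = _SHORT.get((x, y))
--         if ch:
--             h.append(ch)
--         else:
--             g.append(_enc(x))
--             h.append(_enc(y))
--         i.append(_enc(z))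
--     return ''.join(g) + '!!' + ''.join(h) + '!!' + ''.join(i)
-- ===== Notes on version B (the rewrite author's own statement) =====
-- stated objective: alternative
-- what changed: Replaced A's stateful single pass with carry variables (fun_c's running _b,_c,_f plus trailing flush, then per-triple encoding via helper calls) by a staged, index-based computation: build the delta list, a prefix-sum array of the z-deltas, and the list of indices with nonzero (x,y) delta; each emitted triple's z is then a difference of two prefix sums over its window and the trailing flush is the final prefix-sum difference, with encoding done in a last pass over the assembled triple list.
import Mathlib
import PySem

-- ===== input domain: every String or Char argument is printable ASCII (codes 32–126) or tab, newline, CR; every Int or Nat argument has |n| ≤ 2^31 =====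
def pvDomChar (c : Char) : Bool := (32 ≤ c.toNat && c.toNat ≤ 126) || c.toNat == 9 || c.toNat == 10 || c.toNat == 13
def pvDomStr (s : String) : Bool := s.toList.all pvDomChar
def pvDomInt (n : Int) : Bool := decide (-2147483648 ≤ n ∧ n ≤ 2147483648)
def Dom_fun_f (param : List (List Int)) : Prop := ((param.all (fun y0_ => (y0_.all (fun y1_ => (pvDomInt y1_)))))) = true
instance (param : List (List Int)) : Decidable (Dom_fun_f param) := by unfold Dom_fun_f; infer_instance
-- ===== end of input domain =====

-- B replaces A's carry-variable single pass (fun_c then encode) by a staged index-based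
-- computation: delta list, prefix sums of z-deltas, list of nonzero-(x,y) indices, each
-- emitted z a prefix-sum difference; objective: alternative (same cost, different algorithm).

-- ===== PORT A =====

-- l[i] for an index that is in range on every input satisfying Pre_fun_f
def tri (l : List Int) (i : Int) : Int := PySem.List.pyGetD l i 0

-- the for-loop of fun_c: state (_b,_c,_e,_f,_g); indices _h,_h+1 walk adjacent elements
def fun_c_loop : List (List Int) → Int → Int → List (List Int) → Int → List (List Int) →
    Int × Int × List (List Int) × Int
  | cur :: nxt :: rest, _, _, e, f, g =>
    let b' := tri nxt 0 - tri cur 0        -- round() is the identity on ints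
    let c' := tri nxt 1 - tri cur 1
    let d' := tri nxt 2 - tri cur 2
    let g' := g ++ [[b', c', d']]
    if b' = 0 ∧ c' = 0 ∧ d' = 0 then fun_c_loop (nxt :: rest) b' c' e f g'
    else if b' = 0 ∧ c' = 0 then fun_c_loop (nxt :: rest) b' c' e (f + d') g'
    else fun_c_loop (nxt :: rest) b' c' (e ++ [[b', c', d' + f]]) 0 g'
  | _, b, c, e, f, _ => (b, c, e, f)

def fun_c (param : List (List Int)) : List (List Int) :=
  match fun_c_loop param 0 0 [] 0 [] with
  | (b, c, e, f) => if f ≠ 0 then e ++ [[b, c, f]] else e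

def fun_d_b : String := "()*,-./0123456789:?@ABCDEFGHIJKLMNOPQRSTUVWXYZ_abcdefghijklmnopqr"

def fun_d (param : Int) : String :=
  let c : Int := PySem.Str.len fun_d_b
  let e := |param|
  -- int(_e/_c): Python float division of nonnegative ints; the later cap at _c-1 makes the
  -- returned string identical to the one obtained with exact floor division
  let f := PySem.Int.floordiv e c
  let f := if f ≥ c then c - 1 else f
  let d : String := if f ≠ 0 then String.ofList [Char.ofNat f.toNat] else ""
  let e := PySem.Int.mod e c
  let g : String := if param < 0 then "!" else ""
  let g := if d ≠ "" then g ++ "$" else g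
  g ++ d ++ String.ofList [(PySem.Str.pyGet? fun_d_b e).getD ' ']   -- 0 ≤ e < 65 = len: in range

def fun_e_b : List (List Int) := [[1,0],[2,0],[1,-1],[1,1],[0,1],[0,-1],[3,0],[2,-1],[2,1]]

-- fun_e's scan over _b and _c in lock step; `none` is Python's falsy `return 0`
def fun_e_loop (param : List Int) : List (List Int) → List Char → Option Char
  | t :: ts, ch :: chs =>
    if tri param 0 = tri t 0 ∧ tri param 1 = tri t 1 then some ch
    else fun_e_loop param ts chs
  | _, _ => none

def fun_e (param : List Int) : Option Char := fun_e_loop param fun_e_b "stuvwxyz~".toList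

def fun_f_loop : List (List Int) → List String → List String → List String →
    List String × List String × List String
  | j :: rest, g, h, i =>
    match fun_e j with
    | some ch => fun_f_loop rest g (h ++ [String.ofList [ch]]) (i ++ [fun_d (tri j 2)])
    | none => fun_f_loop rest (g ++ [fun_d (tri j 0)]) (h ++ [fun_d (tri j 1)]) (i ++ [fun_d (tri j 2)])
  | [], g, h, i => (g, h, i)

def fun_f (param : List (List Int)) : String :=
  match fun_f_loop (fun_c param) [] [] [] with
  | (g, h, i) => PySem.Str.join "" g ++ "!!" ++ PySem.Str.join "" h ++ "!!" ++ PySem.Str.join "" i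

-- ===== PORT B =====

def encAlph : String := "()*,-./0123456789:?@ABCDEFGHIJKLMNOPQRSTUVWXYZ_abcdefghijklmnopqr"

def shortTbl : PySem.Dict (Int × Int) Char :=
  PySem.Dict.ofList [((1,0),'s'),((2,0),'t'),((1,-1),'u'),((1,1),'v'),((0,1),'w'),
                     ((0,-1),'x'),((3,0),'y'),((2,-1),'z'),((2,1),'~')]

def encB (n : Int) : String :=
  let q := PySem.Int.floordiv |n| 65       -- divmod(abs(n), 65): nonnegative arguments, exact
  let r := PySem.Int.mod |n| 65
  let q := if q ≥ 65 then 64 else q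
  (if n < 0 then "!" else "") ++
    (if q ≠ 0 then "$" ++ String.ofList [Char.ofNat q.toNat] else "") ++
    String.ofList [(PySem.Str.pyGet? encAlph r).getD ' ']   -- 0 ≤ r < 65 = len: in range

-- deltas = [(b[0]-a[0], b[1]-a[1], b[2]-a[2]) for a, b in zip(param, param[1:])]
def deltasB (param : List (List Int)) : List (Int × Int × Int) :=
  (param.zip (param.drop 1)).map
    (fun ab => (tri ab.2 0 - tri ab.1 0, tri ab.2 1 - tri ab.1 1, tri ab.2 2 - tri ab.1 2))

-- s = [0]; t = 0; for _,_,d in deltas: t += d; s.append(t)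
def prefixB (ds : List (Int × Int × Int)) : List Int :=
  (ds.foldl (fun st t => (st.1 ++ [st.2 + t.2.2], st.2 + t.2.2)) (([0] : List Int), (0 : Int))).1

-- marks = [k for k, (b, c, _) in enumerate(deltas) if b or c]
def marksB (ds : List (Int × Int × Int)) : List Int :=
  ((PySem.List.enumerate ds 0).filter (fun kt => decide (kt.2.1 ≠ 0 ∨ kt.2.2.1 ≠ 0))).map (·.1)

-- ds[i] for an in-range index
def idxT (ds : List (Int × Int × Int)) (i : Int) : Int × Int × Int :=
  PySem.List.pyGetD ds i (0, 0, 0)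

def triplesB (ds : List (Int × Int × Int)) : List (Int × Int × Int) :=
  let s := prefixB ds
  let M := marksB ds
  let starts : List Int := 0 :: M.map (· + 1)
  let ts := (starts.zip M).map
    (fun pk => ((idxT ds pk.2).1, (idxT ds pk.2).2.1, tri s (pk.2 + 1) - tri s pk.1))
  let tail := tri s (ds.length : Int) - tri s ((PySem.List.pyGet? starts (-1)).getD 0)
  if tail ≠ 0 then ts ++ [(0, 0, tail)] else ts

def encLoopB : List (Int × Int × Int) → List String → List String → List String →
    List String × List String × List String
  | t :: rest, g, h, i =>
    match PySem.Dict.get? shortTbl (t.1, t.2.1) with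
    | some ch => encLoopB rest g (h ++ [String.ofList [ch]]) (i ++ [encB t.2.2])
    | none => encLoopB rest (g ++ [encB t.1]) (h ++ [encB t.2.1]) (i ++ [encB t.2.2])
  | [], g, h, i => (g, h, i)

def fun_f_alt (param : List (List Int)) : String :=
  match encLoopB (triplesB (deltasB param)) [] [] [] with
  | (g, h, i) => PySem.Str.join "" g ++ "!!" ++ PySem.Str.join "" h ++ "!!" ++ PySem.Str.join "" i

-- ===== PRECONDITION & SPEC =====
-- Pre_ excludes exactly the inputs on which Python A raises IndexError: with at least two
-- points, every point is indexed at [0],[1],[2], so each inner list needs length ≥ 3.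
def Pre_fun_f (param : List (List Int)) : Prop :=
  param.length ≤ 1 ∨ ∀ l ∈ param, 3 ≤ l.length
instance (param : List (List Int)) : Decidable (Pre_fun_f param) := by
  unfold Pre_fun_f; infer_instance

def pvWitness_fun_f : List (List Int) := [[0, 0, 0], [1, 2, 3]]

def Spec_fun_f (param : List (List Int)) (out : String) : Prop := out = fun_f_alt param
instance (param : List (List Int)) (out : String) : Decidable (Spec_fun_f param out) := by
  unfold Spec_fun_f; infer_instance

-- ===== CLAIM (what is proved, stated in full; the proofs are below) =====
def Claim_equal_fun_f : Prop :=
  ∀ (param : List (List Int)), Dom_fun_f param → Pre_fun_f param → Spec_fun_f param (fun_f param)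

-- ===== LEMMAS AND PROOFS =====

-- the common specification of the emitted-triple list: a carry-passing recursion over deltas
def gspec : List (Int × Int × Int) → Int → List (Int × Int × Int)
  | [], a => if a ≠ 0 then [(0, 0, a)] else []
  | t :: rest, a =>
    if t.1 = 0 ∧ t.2.1 = 0 then gspec rest (a + t.2.2)
    else (t.1, t.2.1, t.2.2 + a) :: gspec rest 0

def toL (t : Int × Int × Int) : List Int := [t.1, t.2.1, t.2.2]

-- the delta list, in A's loop shape
def mkDeltas : List (List Int) → List (Int × Int × Int)
  | cur :: nxt :: rest =>
    (tri nxt 0 - tri cur 0, tri nxt 1 - tri cur 1, tri nxt 2 - tri cur 2) :: mkDeltas (nxt :: rest)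
  | _ => []

def sumZ (ds : List (Int × Int × Int)) : Int := (ds.map (fun t => t.2.2)).sum

def marksN : List (Int × Int × Int) → List Nat
  | [] => []
  | t :: ds =>
    if t.1 ≠ 0 ∨ t.2.1 ≠ 0 then 0 :: (marksN ds).map (· + 1) else (marksN ds).map (· + 1)

def psums : List (Int × Int × Int) → Int → List Int
  | [], _ => []
  | t :: ds, t0 => (t0 + t.2.2) :: psums ds (t0 + t.2.2)

def lastStartN (M : List Nat) : Nat := ((0 : Nat) :: M.map (· + 1)).getLast (by simp)

def FN (ds : List (Int × Int × Int)) (a : Int) (pk : Nat × Nat) : Int × Int × Int :=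
  ((ds.getD pk.2 (0,0,0)).1, (ds.getD pk.2 (0,0,0)).2.1,
    sumZ (ds.take (pk.2 + 1)) - sumZ (ds.take pk.1) + if pk.1 = 0 then a else 0)

def tailN (ds : List (Int × Int × Int)) (a : Int) : Int :=
  sumZ ds - sumZ (ds.take (lastStartN (marksN ds))) + if marksN ds = [] then a else 0

def PTfullN (ds : List (Int × Int × Int)) (a : Int) : List (Int × Int × Int) :=
  (((0 : Nat) :: (marksN ds).map (· + 1)).zip (marksN ds)).map (FN ds a) ++
    (if tailN ds a ≠ 0 then [(0, 0, tailN ds a)] else [])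

-- ---- A side ----

theorem fun_c_loop_e (xs : List (List Int)) : ∀ (b c f : Int) (e g : List (List Int)),
    fun_c_loop xs b c e f g =
      (match fun_c_loop xs b c [] f [] with
       | (b₂, c₂, e₂, f₂) => (b₂, c₂, e ++ e₂, f₂)) := by
  induction xs with
  | nil => intro b c f e g; simp [fun_c_loop]
  | cons cur rest ih =>
    intro b c f e g
    match rest, ih with
    | [], _ => simp [fun_c_loop]
    | nxt :: rest', ih =>
      simp only [fun_c_loop]
      generalize tri nxt 0 - tri cur 0 = B
      generalize tri nxt 1 - tri cur 1 = C
      generalize tri nxt 2 - tri cur 2 = D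
      split_ifs with h1 h2
      · rw [ih B C f e (g ++ [[B, C, D]]), ih B C f [] ([] ++ [[B, C, D]])]
        rcases fun_c_loop (nxt :: rest') B C [] f [] with ⟨b₂, c₂, e₂, f₂⟩
        simp
      · rw [ih B C (f + D) e (g ++ [[B, C, D]]), ih B C (f + D) [] ([] ++ [[B, C, D]])]
        rcases fun_c_loop (nxt :: rest') B C [] (f + D) [] with ⟨b₂, c₂, e₂, f₂⟩
        simp
      · rw [ih B C 0 (e ++ [[B, C, D + f]]) (g ++ [[B, C, D]]),
            ih B C 0 ([] ++ [[B, C, D + f]]) ([] ++ [[B, C, D]])]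
        rcases fun_c_loop (nxt :: rest') B C [] 0 [] with ⟨b₂, c₂, e₂, f₂⟩
        simp

-- A's loop plus the trailing flush computes gspec over the deltas
theorem fun_c_loop_gspec (xs : List (List Int)) : ∀ (b c f : Int),
    (f ≠ 0 → b = 0 ∧ c = 0) →
    (match fun_c_loop xs b c [] f [] with
     | (b₂, c₂, e₂, f₂) => e₂ ++ if f₂ ≠ 0 then [[b₂, c₂, f₂]] else [])
      = (gspec (mkDeltas xs) f).map toL := by
  induction xs with
  | nil =>
    intro b c f h
    by_cases hf : f = 0
    · simp [fun_c_loop, mkDeltas, gspec, hf]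
    · obtain ⟨hb, hc⟩ := h hf
      subst hb; subst hc
      simp [fun_c_loop, mkDeltas, gspec, hf, toL]
  | cons cur rest ih =>
    intro b c f h
    match rest, ih with
    | [], _ =>
      by_cases hf : f = 0
      · simp [fun_c_loop, mkDeltas, gspec, hf]
      · obtain ⟨hb, hc⟩ := h hf
        subst hb; subst hc
        simp [fun_c_loop, mkDeltas, gspec, hf, toL]
    | nxt :: rest', ih =>
      simp only [fun_c_loop, mkDeltas]
      generalize tri nxt 0 - tri cur 0 = B
      generalize tri nxt 1 - tri cur 1 = C
      generalize tri nxt 2 - tri cur 2 = D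
      by_cases hBC : B = 0 ∧ C = 0
      · obtain ⟨hB, hC⟩ := hBC; subst hB; subst hC
        by_cases hD : D = 0
        · subst hD
          rw [if_pos ⟨rfl, rfl, rfl⟩]
          have hg : gspec ((0, 0, 0) :: mkDeltas (nxt :: rest')) f
              = gspec (mkDeltas (nxt :: rest')) f := by simp [gspec]
          rw [hg]
          rw [fun_c_loop_e (nxt :: rest') 0 0 f [] ([] ++ [[0, 0, 0]])]
          have := ih 0 0 f (fun _ => ⟨rfl, rfl⟩)
          rcases hl : fun_c_loop (nxt :: rest') 0 0 [] f [] with ⟨b₂, c₂, e₂, f₂⟩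
          rw [hl] at this
          simpa using this
        · have h1 : ¬((0:Int) = 0 ∧ (0:Int) = 0 ∧ D = 0) := by simp [hD]
          rw [if_neg h1, if_pos ⟨rfl, rfl⟩]
          have hg : gspec ((0, 0, D) :: mkDeltas (nxt :: rest')) f
              = gspec (mkDeltas (nxt :: rest')) (f + D) := by simp [gspec]
          rw [hg]
          rw [fun_c_loop_e (nxt :: rest') 0 0 (f + D) [] ([] ++ [[0, 0, D]])]
          have := ih 0 0 (f + D) (fun _ => ⟨rfl, rfl⟩)
          rcases hl : fun_c_loop (nxt :: rest') 0 0 [] (f + D) [] with ⟨b₂, c₂, e₂, f₂⟩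
          rw [hl] at this
          simpa using this
      · have h1 : ¬(B = 0 ∧ C = 0 ∧ D = 0) := fun hh => hBC ⟨hh.1, hh.2.1⟩
        rw [if_neg h1, if_neg hBC]
        have hg : gspec ((B, C, D) :: mkDeltas (nxt :: rest')) f
            = (B, C, D + f) :: gspec (mkDeltas (nxt :: rest')) 0 := by simp [gspec, hBC]
        rw [hg]
        rw [fun_c_loop_e (nxt :: rest') B C 0 ([] ++ [[B, C, D + f]]) ([] ++ [[B, C, D]])]
        have := ih B C 0 (fun hf => absurd rfl hf)
        rcases hl : fun_c_loop (nxt :: rest') B C [] 0 [] with ⟨b₂, c₂, e₂, f₂⟩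
        rw [hl] at this
        simp only [hl] at *
        simp only [List.map_cons, toL]
        rw [← this]
        simp

theorem fun_c_gspec (param : List (List Int)) :
    fun_c param = (gspec (mkDeltas param) 0).map toL := by
  have := fun_c_loop_gspec param 0 0 0 (fun hf => absurd rfl hf)
  unfold fun_c
  rcases hl : fun_c_loop param 0 0 [] 0 [] with ⟨b₂, c₂, e₂, f₂⟩
  rw [hl] at this
  by_cases hf : f₂ = 0 <;> simp [hf] at this ⊢ <;> exact this

-- ---- B side ----

theorem deltasB_eq (param : List (List Int)) : deltasB param = mkDeltas param := by
  induction param with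
  | nil => rfl
  | cons a r ih =>
    cases r with
    | nil => rfl
    | cons b r' =>
      simp only [deltasB, mkDeltas, List.drop_succ_cons, List.drop_zero,
        List.zip_cons_cons, List.map_cons] at *
      simp [ih]

theorem marksB_eq (ds : List (Int × Int × Int)) :
    marksB ds = (marksN ds).map (fun (k : Nat) => (k : Int)) := by
  have key : ∀ (ds : List (Int × Int × Int)) (s : Int),
      ((PySem.List.enumerate ds s).filter (fun kt => decide (kt.2.1 ≠ 0 ∨ kt.2.2.1 ≠ 0))).map (·.1)
        = (marksN ds).map (fun (k : Nat) => (k : Int) + s) := by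
    intro ds
    induction ds with
    | nil => intro s; simp [marksN, PySem.List.enumerate_nil]
    | cons t rest ih =>
      intro s
      rw [PySem.List.enumerate_cons]
      by_cases hc : t.1 ≠ 0 ∨ t.2.1 ≠ 0
      · rw [List.filter_cons_of_pos (by simpa using hc), List.map_cons,
          marksN, if_pos hc, ih (s + 1), List.map_cons, List.map_map]
        congr 1
        · push_cast; ring
        · apply List.map_congr_left
          intro k _
          simp only [Function.comp_apply]
          push_cast; ring
      · rw [List.filter_cons_of_neg (by simpa using hc),
          marksN, if_neg hc, ih (s + 1), List.map_map]
        apply List.map_congr_left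
        intro k _
        simp only [Function.comp_apply]
        push_cast; ring
  have := key ds 0
  simp only [add_zero] at this
  rw [marksB, this]

theorem marksN_lt (ds : List (Int × Int × Int)) : ∀ k ∈ marksN ds, k < ds.length := by
  induction ds with
  | nil => simp [marksN]
  | cons t rest ih =>
    intro k hk
    simp only [marksN] at hk
    by_cases hc : t.1 ≠ 0 ∨ t.2.1 ≠ 0
    · rw [if_pos hc] at hk
      rcases List.mem_cons.mp hk with h0 | hm
      · simp [h0]
      · obtain ⟨m, hm', rfl⟩ := List.mem_map.mp hm
        have := ih m hm'
        simp only [List.length_cons]; omega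
    · rw [if_neg hc] at hk
      obtain ⟨m, hm', rfl⟩ := List.mem_map.mp hk
      have := ih m hm'
      simp only [List.length_cons]; omega

theorem psums_getD (ds : List (Int × Int × Int)) : ∀ (t0 : Int) (i : Nat), i < ds.length →
    (psums ds t0).getD i 0 = t0 + sumZ (ds.take (i + 1)) := by
  induction ds with
  | nil => intro t0 i h; simp at h
  | cons t rest ih =>
    intro t0 i h
    cases i with
    | zero => simp [psums, sumZ]
    | succ j =>
      simp only [psums, List.getD_cons_succ]
      rw [ih (t0 + t.2.2) j (by simp at h; omega)]
      simp [sumZ]; ring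

theorem prefixB_eq (ds : List (Int × Int × Int)) : prefixB ds = 0 :: psums ds 0 := by
  have key : ∀ (ds : List (Int × Int × Int)) (s0 : List Int) (t0 : Int),
      (ds.foldl (fun st t => (st.1 ++ [st.2 + t.2.2], st.2 + t.2.2)) (s0, t0)).1
        = s0 ++ psums ds t0 := by
    intro ds
    induction ds with
    | nil => intro s0 t0; simp [psums]
    | cons t rest ih =>
      intro s0 t0
      simp only [List.foldl_cons, psums, ih]
      simp
  have := key ds [0] 0
  simpa [prefixB] using this

theorem prefixB_getD (ds : List (Int × Int × Int)) (i : Nat) (h : i ≤ ds.length) :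
    (prefixB ds).getD i 0 = sumZ (ds.take i) := by
  rw [prefixB_eq]
  cases i with
  | zero => simp [sumZ]
  | succ j =>
    simp only [List.getD_cons_succ]
    exact psums_getD ds 0 j (by omega) |>.trans (by simp)

theorem lastStartN_le (ds : List (Int × Int × Int)) : lastStartN (marksN ds) ≤ ds.length := by
  have hmem : lastStartN (marksN ds) ∈ (0 : Nat) :: (marksN ds).map (· + 1) :=
    List.getLast_mem _
  rcases List.mem_cons.mp hmem with h0 | hm
  · omega
  · obtain ⟨m, hm', hme⟩ := List.mem_map.mp hm
    have := marksN_lt ds m hm'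
    omega

theorem getLast_zero_map_succ (l : List Nat) (h : l ≠ []) :
    ((0 : Nat) :: l.map (· + 1)).getLast (by simp) = l.getLast h + 1 := by
  have hne : l.map (· + 1) ≠ [] := by simpa using h
  rw [List.getLast_cons hne, List.getLast_map]

theorem natStarts_cast (M : List Nat) :
    (0 : Int) :: ((M.map (fun (k : Nat) => (k : Int))).map (· + 1))
      = ((0 : Nat) :: M.map (· + 1)).map (fun (k : Nat) => (k : Int)) := by
  simp only [List.map_cons, List.map_map, Nat.cast_zero]
  refine congrArg₂ List.cons rfl ?_
  apply List.map_congr_left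
  intro k _
  simp only [Function.comp_apply]
  push_cast; ring

theorem triplesB_eq (ds : List (Int × Int × Int)) : triplesB ds = PTfullN ds 0 := by
  have hzip : ((0 : Int) :: (marksB ds).map (· + 1)).zip (marksB ds)
      = (((0 : Nat) :: (marksN ds).map (· + 1)).zip (marksN ds)).map
          (fun pk => (((pk.1 : Nat) : Int), ((pk.2 : Nat) : Int))) := by
    rw [marksB_eq, natStarts_cast, List.zip_map]
    apply List.map_congr_left
    intro pk _
    rfl
  have hmap : (((0 : Int) :: (marksB ds).map (· + 1)).zip (marksB ds)).map
        (fun pk => ((idxT ds pk.2).1, (idxT ds pk.2).2.1,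
          tri (prefixB ds) (pk.2 + 1) - tri (prefixB ds) pk.1))
      = (((0 : Nat) :: (marksN ds).map (· + 1)).zip (marksN ds)).map (FN ds 0) := by
    rw [hzip, List.map_map]
    apply List.map_congr_left
    intro pk hpk
    obtain ⟨hp, hk⟩ := List.of_mem_zip hpk
    have hklt : pk.2 < ds.length := marksN_lt ds pk.2 hk
    have hple : pk.1 ≤ ds.length := by
      rcases List.mem_cons.mp hp with h0 | hm
      · omega
      · obtain ⟨m, hm2, hme⟩ := List.mem_map.mp hm
        have := marksN_lt ds m hm2
        omega
    simp only [Function.comp_apply, FN, idxT, tri]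
    have h1 : ((pk.2 : Int) + 1) = ((pk.2 + 1 : Nat) : Int) := by push_cast; ring
    rw [h1]
    simp only [PySem.List.pyGetD_natCast]
    rw [prefixB_getD ds (pk.2 + 1) (by omega), prefixB_getD ds pk.1 hple]
    simp
  have htail : tri (prefixB ds) ((ds.length : Nat) : Int)
        - tri (prefixB ds) ((PySem.List.pyGet? ((0 : Int) :: (marksB ds).map (· + 1)) (-1)).getD 0)
      = tailN ds 0 := by
    have hlast : (PySem.List.pyGet? ((0 : Int) :: (marksB ds).map (· + 1)) (-1)).getD 0
        = ((lastStartN (marksN ds) : Nat) : Int) := by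
      rw [PySem.List.pyGet?_neg_one, marksB_eq, natStarts_cast]
      rw [List.getLast?_eq_some_getLast (by simp), List.getLast_map]
      rfl
    rw [hlast]
    simp only [tri, PySem.List.pyGetD_natCast]
    rw [prefixB_getD ds ds.length (le_refl _), prefixB_getD ds _ (lastStartN_le ds)]
    simp [tailN]
  simp only [triplesB, PTfullN]
  rw [hmap, htail]
  by_cases ht : tailN ds 0 = 0 <;> simp [ht]

theorem sumZ_cons (t : Int × Int × Int) (ds : List (Int × Int × Int)) :
    sumZ (t :: ds) = t.2.2 + sumZ ds := by simp [sumZ]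

theorem lastStartN_cons_zero (M : List Nat) :
    lastStartN (0 :: M.map (· + 1)) = lastStartN M + 1 := by
  unfold lastStartN
  exact getLast_zero_map_succ (0 :: M.map (· + 1)) (by simp)

theorem lastStartN_map_succ (m : Nat) (M : List Nat) :
    lastStartN ((m :: M).map (· + 1)) = lastStartN (m :: M) + 1 := by
  unfold lastStartN
  rw [getLast_zero_map_succ ((m :: M).map (· + 1)) (by simp)]
  rw [List.getLast_cons (by simp : (m :: M).map (· + 1) ≠ [])]

theorem mapFN_shift (t : Int × Int × Int) (ds : List (Int × Int × Int)) (a a' : Int)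
    (ps : List (Nat × Nat)) (h : ∀ pk ∈ ps, (if pk.1 = 0 then a' else (0 : Int)) = 0) :
    (ps.map (fun pk => (pk.1 + 1, pk.2 + 1))).map (FN (t :: ds) a) = ps.map (FN ds a') := by
  rw [List.map_map]
  apply List.map_congr_left
  intro pk hpk
  simp only [Function.comp_apply, FN, List.getD_cons_succ, List.take_succ_cons]
  simp only [Prod.mk.injEq, true_and]
  rw [h pk hpk]
  simp [sumZ]

theorem zip_map_succ (Y Z : List Nat) :
    (Y.map (· + 1)).zip (Z.map (· + 1)) = (Y.zip Z).map (fun pk => (pk.1 + 1, pk.2 + 1)) := by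
  rw [List.zip_map]
  apply List.map_congr_left
  intro pk _
  rfl

theorem PTfullN_gspec (ds : List (Int × Int × Int)) : ∀ a, PTfullN ds a = gspec ds a := by
  induction ds with
  | nil =>
    intro a
    by_cases ha : a = 0 <;>
      simp [PTfullN, marksN, tailN, lastStartN, sumZ, gspec, ha]
  | cons t ds ih =>
    intro a
    rcases t with ⟨b, c, d⟩
    by_cases hbc : b ≠ 0 ∨ c ≠ 0
    · -- mark: this delta is emitted and absorbs the carry
      have hM : marksN ((b, c, d) :: ds) = 0 :: (marksN ds).map (· + 1) := by
        simp [marksN, hbc]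
      have hg : gspec ((b, c, d) :: ds) a = (b, c, d + a) :: gspec ds 0 := by
        have hn : ¬(b = 0 ∧ c = 0) := by tauto
        simp [gspec, hn]
      rw [hg, ← ih 0]
      have htail : tailN ((b, c, d) :: ds) a = tailN ds 0 := by
        unfold tailN
        rw [hM, lastStartN_cons_zero]
        simp only [List.take_succ_cons, sumZ_cons]
        rw [if_neg (by simp)]
        by_cases hm : marksN ds = [] <;> simp [hm]
      unfold PTfullN
      rw [hM, htail]
      have hz : ((0 : Nat) :: (0 :: (marksN ds).map (· + 1)).map (· + 1)).zip
            (0 :: (marksN ds).map (· + 1))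
          = (0, 0) :: ((((0 : Nat) :: (marksN ds).map (· + 1)).zip (marksN ds)).map
              (fun pk => (pk.1 + 1, pk.2 + 1))) := by
        rw [List.map_cons, List.zip_cons_cons]
        refine congrArg₂ List.cons rfl ?_
        have : ((0 : Nat) + 1) :: ((marksN ds).map (· + 1)).map (· + 1)
            = ((0 : Nat) :: (marksN ds).map (· + 1)).map (· + 1) := by simp
        rw [this, zip_map_succ]
      rw [hz, List.map_cons]
      rw [mapFN_shift _ ds a 0 _ (fun pk _ => by simp)]
      have hhead : FN ((b, c, d) :: ds) a (0, 0) = (b, c, d + a) := by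
        simp [FN, sumZ]
      rw [hhead, List.cons_append]
    · -- zero (x,y)-delta: its z joins the carry
      have hb : b = 0 := by by_contra h; exact hbc (Or.inl h)
      have hc : c = 0 := by by_contra h; exact hbc (Or.inr h)
      subst hb; subst hc
      have hM : marksN ((0, 0, d) :: ds) = (marksN ds).map (· + 1) := by
        simp [marksN]
      have hg : gspec ((0, 0, d) :: ds) a = gspec ds (a + d) := by simp [gspec]
      rw [hg, ← ih (a + d)]
      unfold PTfullN
      rw [hM]
      cases hMc : marksN ds with
      | nil =>
        have htail : tailN ((0, 0, d) :: ds) a = tailN ds (a + d) := by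
          unfold tailN
          rw [hM, hMc]
          simp [lastStartN, sumZ]
          ring
        rw [htail]
        simp
      | cons m M' =>
        have htail : tailN ((0, 0, d) :: ds) a = tailN ds (a + d) := by
          unfold tailN
          rw [hM, hMc, lastStartN_map_succ]
          simp only [List.take_succ_cons, sumZ_cons]
          rw [if_neg (by simp), if_neg (by simp)]
          ring
        rw [htail]
        simp only [List.map_cons, List.zip_cons_cons]
        have hz : ((m + 1 + 1) :: ((M'.map (· + 1)).map (· + 1))).zip (M'.map (· + 1))
            = ((((m + 1) :: M'.map (· + 1)).zip M').map (fun pk => (pk.1 + 1, pk.2 + 1))) := by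
          have : (m + 1 + 1) :: ((M'.map (· + 1)).map (· + 1))
              = ((m + 1) :: M'.map (· + 1)).map (· + 1) := by simp
          rw [this, ← zip_map_succ]
        rw [hz]
        rw [mapFN_shift _ ds a (a + d) _ ?hcond]
        case hcond =>
          intro pk hpk
          obtain ⟨hp, _⟩ := List.of_mem_zip hpk
          rcases List.mem_cons.mp hp with h0 | hm2
          · rw [h0]; simp
          · obtain ⟨u, _, hu⟩ := List.mem_map.mp hm2
            rw [if_neg (by omega)]
        have hhead : FN ((0, 0, d) :: ds) a (0, m + 1) = FN ds (a + d) (0, m) := by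
          simp only [FN, List.getD_cons_succ, List.take_succ_cons, sumZ_cons]
          simp only [Prod.mk.injEq, true_and]
          simp [sumZ]
          ring
        rw [hhead, List.cons_append]

-- ---- encoding side ----

theorem tri0 (x y z : Int) : tri [x, y, z] 0 = x := rfl
theorem tri1 (x y z : Int) : tri [x, y, z] 1 = y := rfl
theorem tri2 (x y z : Int) : tri [x, y, z] 2 = z := rfl
theorem tri20 (x y : Int) : tri [x, y] 0 = x := rfl
theorem tri21 (x y : Int) : tri [x, y] 1 = y := rfl

theorem enc_eq (n : Int) : encB n = fun_d n := by
  have hlen : PySem.Str.len fun_d_b = (65 : Int) := by decide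
  have halph : encAlph = fun_d_b := rfl
  simp only [encB, fun_d, hlen, halph, ge_iff_le]
  generalize PySem.Int.floordiv |n| 65 = Q
  generalize PySem.Int.mod |n| 65 = R
  by_cases h0 : (if (65:Int) ≤ Q then (64:Int) else Q) = 0
  · simp [h0]
  · have hne : (String.ofList [Char.ofNat (if (65:Int) ≤ Q then (64:Int) else Q).toNat]) ≠ "" := by
      intro h
      have := congrArg String.toList h
      simp at this
    simp [h0, hne, String.append_assoc]

theorem dict_chain (x y z : Int) : ∀ (ps : List ((Int × Int) × Char)),
    fun_e_loop [x, y, z] (ps.map (fun p => [p.1.1, p.1.2])) (ps.map (·.2))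
      = PySem.Dict.get? (PySem.Dict.mk ps) (x, y) := by
  intro ps
  induction ps with
  | nil => rfl
  | cons p rest ih =>
    rcases p with ⟨⟨a, b⟩, ch⟩
    by_cases hxy : x = a ∧ y = b
    · obtain ⟨h1, h2⟩ := hxy; subst h1; subst h2
      simp [fun_e_loop, tri0, tri1, tri20, tri21, PySem.Dict.get?_mk_cons]
    · have hb : ¬((a, b) = (x, y)) :=
        fun hh => hxy ⟨(congrArg Prod.fst hh).symm, (congrArg Prod.snd hh).symm⟩
      simp [fun_e_loop, tri0, tri1, tri20, tri21, PySem.Dict.get?_mk_cons, hxy, hb, ih]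

theorem fun_e_eq (x y z : Int) : fun_e [x, y, z] = PySem.Dict.get? shortTbl (x, y) := by
  have hb : fun_e_b = ([((1,0),'s'),((2,0),'t'),((1,-1),'u'),((1,1),'v'),((0,1),'w'),
      ((0,-1),'x'),((3,0),'y'),((2,-1),'z'),((2,1),'~')] : List ((Int × Int) × Char)).map
        (fun p => [p.1.1, p.1.2]) := by rfl
  have hcs : "stuvwxyz~".toList = ([((1,0),'s'),((2,0),'t'),((1,-1),'u'),((1,1),'v'),((0,1),'w'),
      ((0,-1),'x'),((3,0),'y'),((2,-1),'z'),((2,1),'~')] : List ((Int × Int) × Char)).map (·.2) := by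
    decide
  have hd : shortTbl = PySem.Dict.mk [((1,0),'s'),((2,0),'t'),((1,-1),'u'),((1,1),'v'),((0,1),'w'),
      ((0,-1),'x'),((3,0),'y'),((2,-1),'z'),((2,1),'~')] := by rfl
  rw [fun_e, hb, hcs, hd]
  exact dict_chain x y z _

theorem encLoopB_eq (ts : List (Int × Int × Int)) : ∀ (g h i : List String),
    encLoopB ts g h i = fun_f_loop (ts.map toL) g h i := by
  induction ts with
  | nil => intro g h i; simp [encLoopB, fun_f_loop]
  | cons t rest ih =>
    intro g h i
    rcases t with ⟨x, y, z⟩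
    simp only [List.map_cons, encLoopB, fun_f_loop, toL, fun_e_eq, tri0, tri1, tri2, enc_eq]
    cases PySem.Dict.get? shortTbl (x, y) <;> simp [ih]

-- ===== VERDICT (by name: the statement is the Claim_ definition above) =====
theorem fun_f_spec : Claim_equal_fun_f := by
  intro param _ _
  unfold Spec_fun_f fun_f fun_f_alt
  rw [fun_c_gspec, triplesB_eq, deltasB_eq, PTfullN_gspec, ← encLoopB_eq]
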